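-- pv_equiv track=rewrite | github.com/nermadie/CodeForces_Solutions | CodeforcesRound957Div3/prob04.py | solve
-- ===== SOURCE A (Python) =====
-- def solve(n, m, k, a):
--     a = "0" + a
--     last_right = 0
--     last_water = 0
--     cur_pos = 0
--     while True:
--         if cur_pos + m > n:
--             return "YES"
--         check_to_water = True
--         check_found_water = False
--         for i in range(m + cur_pos, last_right, -1):
--             last_right = cur_pos + m
--             if a[i] == "W":
--                 if not check_found_water:
--                     last_water = i
--                     check_found_water = True
--             if a[i] == "L":
--                 cur_pos = i
--                 check_to_water = False
--                 break
--         if check_to_water: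
--             if last_right != last_water or k == 0:
--                 return "NO"
--             k -= 1
--             cur_pos = last_water
--             while True:
--                 cur_pos += 1
--                 if cur_pos > n:
--                     return "YES"
--                 if a[cur_pos] == "L":
--                     break
--                 if a[cur_pos] == "W":
--                     if k == 0:
--                         return "NO"
--                     k -= 1
--                 if a[cur_pos] == "C":
--                     return "NO"
-- ===== SOURCE B (Python) =====
-- def solve(n, m, k, a):
--     # Table-driven reimplementation: three precomputation passes build index
--     # tables (nearest log/water to the left, next stop cell to the right,
--     # prefix water counts), after which the main loop does O(1) work per step
--     # with no inner scans.
--     if m > n: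
--         return "YES"
--     s = "0" + a
--     prevL = [0] * (n + 1)   # prevL[i] = largest j <= i with s[j] == 'L' (0 if none)
--     prevW = [0] * (n + 1)   # prevW[i] = largest j <= i with s[j] == 'W' (0 if none)
--     pl = pw = 0
--     for i in range(1, n + 1):
--         if s[i] == 'L':
--             pl = i
--         elif s[i] == 'W':
--             pw = i
--         prevL[i] = pl
--         prevW[i] = pw
--     stop = [0] * (n + 2)    # stop[t] = first u >= t with s[u] in 'LC', else n+1
--     stop[n + 1] = n + 1
--     for t in range(n, 0, -1):
--         stop[t] = t if s[t] in 'LC' else stop[t + 1]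
--     cntW = [0] * (n + 2)    # cntW[j] = number of 'W' among s[1..j-1]
--     for i in range(1, n + 1):
--         cntW[i + 1] = cntW[i] + (s[i] == 'W')
--     cur = lr = lw = 0
--     while cur + m <= n:
--         hi = cur + m
--         if hi > lr:
--             j = prevL[hi]
--             if j > lr:
--                 # farthest log within reach: jump there
--                 if prevW[hi] > j:
--                     lw = prevW[hi]
--                 lr, cur = hi, j
--                 continue
--             if prevW[hi] > lr:
--                 lw = prevW[hi]
--             lr = hi
--         # no reachable log: must swim from the farthest cell, which must be water
--         if lw != lr or k == 0:
--             return "NO"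
--         t = stop[lw + 1]
--         c = cntW[t] - cntW[lw + 1]
--         if (t <= n and s[t] == 'C') or k <= c:
--             return "NO"
--         k -= c + 1
--         if t > n:
--             return "YES"
--         cur = t
--     return "YES"
-- ===== Notes on version B (the rewrite author's own statement) =====
-- stated objective: alternative
-- what changed: A's rescanning greedy (a fresh downward index scan per jump and a per-meter stamina-decrement swim loop) is replaced by three precomputation passes building index tables (nearest log/water position to the left, next stop cell to the right, prefix water counts), after which the main loop makes O(1) table lookups per step with no inner scans.
-- outside the precondition, e.g. on solve(-5, -5, 0, 'LLLLLLLL'): A returns 'NO', B raises IndexError; on solve(1, 1, -1, 'W'): A returns 'YES', B returns 'NO'; on solve(3, 1, 0, 'W'): A returns 'NO', B raises IndexError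
import Mathlib
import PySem

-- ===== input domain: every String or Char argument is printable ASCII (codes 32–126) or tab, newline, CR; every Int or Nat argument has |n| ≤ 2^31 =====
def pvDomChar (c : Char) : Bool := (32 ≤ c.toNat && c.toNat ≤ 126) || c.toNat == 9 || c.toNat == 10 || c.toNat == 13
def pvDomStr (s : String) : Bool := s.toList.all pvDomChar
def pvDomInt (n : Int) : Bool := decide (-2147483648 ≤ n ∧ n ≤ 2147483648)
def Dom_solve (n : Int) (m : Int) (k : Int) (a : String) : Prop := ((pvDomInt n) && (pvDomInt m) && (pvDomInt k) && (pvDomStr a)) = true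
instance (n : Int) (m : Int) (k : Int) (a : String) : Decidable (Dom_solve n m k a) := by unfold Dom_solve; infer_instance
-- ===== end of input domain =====

-- B replaces A's rescanning greedy (a downward scan per jump, a per-meter stamina-decrement swim)
-- by three precomputation passes building index tables (nearest log/water to the left, next stop
-- cell to the right, prefix water counts), after which the main loop does O(1) table lookups per
-- step with no inner scans (objective: alternative).

-- ===== PORT A =====
def solveScan (s : List Char) (curm : Int) : List Int → Int → Int → Bool → (Option Int × Int × Int × Bool)
  | [], lr, lw, fW => (none, lr, lw, fW)
  | i :: rest, _, lw, fW =>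
    let lr' := curm
    let lw' := if PySem.List.pyGetD s i (Char.ofNat 0) = 'W' ∧ fW = false then i else lw
    let fW' := if PySem.List.pyGetD s i (Char.ofNat 0) = 'W' ∧ fW = false then true else fW
    if PySem.List.pyGetD s i (Char.ofNat 0) = 'L' then (some i, lr', lw', fW')
    else solveScan s curm rest lr' lw' fW'

def solveSwim (s : List Char) (n : Int) (cur k : Int) : String ⊕ (Int × Int) :=
  if h : cur + 1 > n then Sum.inl "YES"
  else if PySem.List.pyGetD s (cur + 1) (Char.ofNat 0) = 'L' then Sum.inr (cur + 1, k)
  else if PySem.List.pyGetD s (cur + 1) (Char.ofNat 0) = 'W' then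
    (if k = 0 then Sum.inl "NO" else solveSwim s n (cur + 1) (k - 1))
  else if PySem.List.pyGetD s (cur + 1) (Char.ofNat 0) = 'C' then Sum.inl "NO"
  else solveSwim s n (cur + 1) k
termination_by (n - cur).toNat
decreasing_by all_goals omega

def solveLoop (s : List Char) (n m : Int) : Nat → Int → Int → Int → Int → String
  | 0, _, _, _, _ => "NO"
  | fuel + 1, cur, lr, lw, k =>
    if cur + m > n then "YES"
    else
      match solveScan s (cur + m) (PySem.List.pyRange (m + cur) lr (-1)) lr lw false with
      | (some i, lr', lw', _) => solveLoop s n m fuel i lr' lw' k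
      | (none, lr', lw', _) =>
        if lr' ≠ lw' ∨ k = 0 then "NO"
        else
          match solveSwim s n lw' (k - 1) with
          | Sum.inl r => r
          | Sum.inr (cur', k') => solveLoop s n m fuel cur' lr' lw' k'

def solve (n : Int) (m : Int) (k : Int) (a : String) : String :=
  solveLoop ('0' :: a.toList) n m (2 * a.toList.length + 10) 0 0 0 k

-- ===== PORT B =====
-- prevL/prevW pass: one left-to-right sweep recording the latest log / water index
def bPrevStep (s : List Char) (st : List Int × List Int × Int × Int) (i : Int) : List Int × List Int × Int × Int :=
  let c := PySem.List.pyGetD s i (Char.ofNat 0)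
  let pl' := if c = 'L' then i else st.2.2.1
  let pw' := if c = 'W' then i else st.2.2.2   -- Python's elif: 'L' and 'W' are mutually exclusive
  (PySem.List.pySetD st.1 i pl', PySem.List.pySetD st.2.1 i pw', pl', pw')

-- stop pass: right-to-left, stop[t] = first cell ≥ t holding 'L' or 'C' (n+1 if none)
def bStopStep (s : List Char) (tbl : List Int) (t : Int) : List Int :=
  let c := PySem.List.pyGetD s t (Char.ofNat 0)
  PySem.List.pySetD tbl t (if c = 'L' ∨ c = 'C' then t else PySem.List.pyGetD tbl (t + 1) 0)

-- prefix-count pass: cntW[j] = number of 'W' among cells 1..j-1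
def bCntStep (s : List Char) (tbl : List Int) (i : Int) : List Int :=
  PySem.List.pySetD tbl (i + 1)
    (PySem.List.pyGetD tbl i 0 + (if PySem.List.pyGetD s i (Char.ofNat 0) = 'W' then 1 else 0))

-- the shared no-reachable-log tail of one loop iteration (`recf` is the loop continuation)
def bTail (s : List Char) (n : Int) (stopT cntT : List Int) (recf : Int → Int → Int → Int → String) (lr lw k : Int) : String :=
  if lw ≠ lr ∨ k = 0 then "NO"
  else
    let t := PySem.List.pyGetD stopT (lw + 1) 0
    let c := PySem.List.pyGetD cntT t 0 - PySem.List.pyGetD cntT (lw + 1) 0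
    if (t ≤ n ∧ PySem.List.pyGetD s t (Char.ofNat 0) = 'C') ∨ k ≤ c then "NO"
    else if t > n then "YES"
    else recf t lr lw (k - (c + 1))

def bLoop (s : List Char) (n m : Int) (prevL prevW stopT cntT : List Int) : Nat → Int → Int → Int → Int → String
  | 0, _, _, _, _ => "NO"
  | fuel + 1, cur, lr, lw, k =>
    if cur + m ≤ n then
      let hi := cur + m
      if hi > lr then
        let j := PySem.List.pyGetD prevL hi 0
        let w := PySem.List.pyGetD prevW hi 0
        if j > lr then
          bLoop s n m prevL prevW stopT cntT fuel j hi (if w > j then w else lw) k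
        else
          bTail s n stopT cntT (bLoop s n m prevL prevW stopT cntT fuel) hi (if w > lr then w else lw) k
      else bTail s n stopT cntT (bLoop s n m prevL prevW stopT cntT fuel) lr lw k
    else "YES"

def solve_alt (n : Int) (m : Int) (k : Int) (a : String) : String :=
  if m > n then "YES"
  else
    let s := '0' :: a.toList
    let p := (PySem.List.pyRange 1 (n + 1) 1).foldl (bPrevStep s)
      (List.replicate (n + 1).toNat 0, List.replicate (n + 1).toNat 0, 0, 0)
    let stopT := (PySem.List.pyRange n 0 (-1)).foldl (bStopStep s)
      (PySem.List.pySetD (List.replicate (n + 2).toNat 0) (n + 1) (n + 1))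
    let cntT := (PySem.List.pyRange 1 (n + 1) 1).foldl (bCntStep s) (List.replicate (n + 2).toNat 0)
    bLoop s n m p.1 p.2.1 stopT cntT (2 * a.toList.length + 10) 0 0 0 k

-- ===== PRECONDITION & SPEC =====
-- Pre_ keeps the problem's natural domain plus the trivial jump-over case: n at most the river
-- length len(a), or m > n (immediate "YES" before any read) — for other n > len(a) A indexes past
-- the string and raises IndexError except on paths that happen to fail first — and m, k
-- nonnegative as the contest guarantees: for negative m or k, A's downward range vs Python's
-- negative indexing, and A's `k == 0` stamina test, yield accidental values.
def Pre_solve (n : Int) (m : Int) (k : Int) (a : String) : Prop :=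
  (0 ≤ m ∧ 0 ≤ k ∧ n ≤ (a.toList.length : Int)) ∨ n < m
instance (n : Int) (m : Int) (k : Int) (a : String) : Decidable (Pre_solve n m k a) := by
  unfold Pre_solve; infer_instance

def pvWitness_solve : Int × Int × Int × String := (6, 2, 2, "LWLLWW")

def Spec_solve (n : Int) (m : Int) (k : Int) (a : String) (out : String) : Prop := out = solve_alt n m k a
instance (n : Int) (m : Int) (k : Int) (a : String) (out : String) : Decidable (Spec_solve n m k a out) := by unfold Spec_solve; infer_instance

-- ===== CLAIM (what is proved, stated in full; the proofs are below) =====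
def Claim_equal_solve : Prop := ∀ (n : Int) (m : Int) (k : Int) (a : String), Dom_solve n m k a → Pre_solve n m k a → Spec_solve n m k a (solve n m k a)

-- ===== LEMMAS AND PROOFS =====

-- topIdx s c j = largest position 1 ≤ i ≤ j with s[i] = c (0 if none)
def topIdx (s : List Char) (c : Char) : Nat → Int
  | 0 => 0
  | j + 1 => if s.getD (j + 1) (Char.ofNat 0) = c then ((j : Int) + 1) else topIdx s c j

-- cntSpec s j = number of 'W' among positions 1..j
def cntSpec (s : List Char) : Nat → Int
  | 0 => 0
  | j + 1 => cntSpec s j + (if s.getD (j + 1) (Char.ofNat 0) = 'W' then 1 else 0)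

-- stopS s n t = first u ≥ t with s[u] ∈ {L,C}, or n+1 when the search runs off the river
def stopS (s : List Char) (n : Int) (t : Int) : Int :=
  if h : n < t then n + 1
  else if PySem.List.pyGetD s t (Char.ofNat 0) = 'L' ∨ PySem.List.pyGetD s t (Char.ofNat 0) = 'C' then t
  else stopS s n (t + 1)
termination_by (n + 1 - t).toNat
decreasing_by omega

theorem topIdx_nonneg (s : List Char) (c : Char) (j : Nat) : 0 ≤ topIdx s c j := by
  induction j with
  | zero => simp [topIdx]
  | succ j ih => rw [topIdx]; split <;> omega

theorem topIdx_le (s : List Char) (c : Char) (j : Nat) : topIdx s c j ≤ (j : Int) := by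
  induction j with
  | zero => simp [topIdx]
  | succ j ih => rw [topIdx]; split <;> push_cast <;> omega

theorem cntSpec_mono (s : List Char) (i j : Nat) (h : i ≤ j) : cntSpec s i ≤ cntSpec s j := by
  induction j with
  | zero => have : i = 0 := by omega
            simp [this]
  | succ j ih =>
    rcases Nat.eq_or_lt_of_le h with he | hl
    · rw [he]
    · have := ih (by omega)
      rw [cntSpec]; split <;> omega

theorem stopS_ge (s : List Char) (n : Int) :
    ∀ (d : Nat) (t : Int), (n + 1 - t).toNat = d → t ≤ n + 1 → t ≤ stopS s n t := by
  intro d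
  induction d with
  | zero => intro t hd ht; rw [stopS]; rw [dif_pos (by omega)]; omega
  | succ d ih =>
    intro t hd ht
    rw [stopS]
    by_cases h1 : n < t
    · rw [dif_pos h1]; omega
    · rw [dif_neg h1]
      split
      · omega
      · have := ih (t + 1) (by omega) (by omega); omega

theorem stopS_le (s : List Char) (n : Int) :
    ∀ (d : Nat) (t : Int), (n + 1 - t).toNat = d → t ≤ n + 1 → stopS s n t ≤ n + 1 := by
  intro d
  induction d with
  | zero => intro t hd ht; rw [stopS]; rw [dif_pos (by omega)]
  | succ d ih =>
    intro t hd ht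
    rw [stopS]
    by_cases h1 : n < t
    · rw [dif_pos h1]
    · rw [dif_neg h1]
      split
      · omega
      · exact ih (t + 1) (by omega) (by omega)

-- getD through a set, the one list fact the table proofs need
theorem getD_set_eq {xs : List Int} {i j : Nat} {v d : Int} :
    (xs.set i v).getD j d = if i = j ∧ i < xs.length then v else xs.getD j d := by
  rw [List.getD_eq_getElem?_getD, List.getD_eq_getElem?_getD, List.getElem?_set]
  by_cases h1 : i = j
  · subst h1
    by_cases h2 : i < xs.length <;> simp [h2]
  · simp [h1]

-- ==== A-side characterisation of the downward jump scan ====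
def scanSpecT (s : List Char) (lo hi curm lr lw : Int) (fW : Bool) : Option Int × Int × Int × Bool :=
  if hi ≤ lo then (none, lr, lw, fW)
  else if topIdx s 'L' hi.toNat > lo then
    (some (topIdx s 'L' hi.toNat), curm,
     (if fW = false ∧ topIdx s 'W' hi.toNat > topIdx s 'L' hi.toNat then topIdx s 'W' hi.toNat else lw),
     (if fW = false ∧ topIdx s 'W' hi.toNat > topIdx s 'L' hi.toNat then true else fW))
  else
    (none, curm,
     (if fW = false ∧ topIdx s 'W' hi.toNat > lo then topIdx s 'W' hi.toNat else lw),
     (if fW = false ∧ topIdx s 'W' hi.toNat > lo then true else fW))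

theorem topIdx_succ (s : List Char) (c : Char) (hi : Int) (h1 : 1 ≤ hi) :
    topIdx s c hi.toNat = if s.getD hi.toNat (Char.ofNat 0) = c then hi else topIdx s c (hi - 1).toNat := by
  have he : hi.toNat = (hi - 1).toNat + 1 := by omega
  rw [he, topIdx]
  have : (((hi - 1).toNat : Int) + 1) = hi := by omega
  rw [this]

theorem scanSpecT_step (s : List Char) (lo hi curm lr lw : Int) (fW : Bool)
    (hlo : 0 ≤ lo) (h : lo < hi) :
    scanSpecT s lo hi curm lr lw fW =
      (let x := s.getD hi.toNat (Char.ofNat 0);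
       let lw1 := if x = 'W' ∧ fW = false then hi else lw;
       let fW1 := if x = 'W' ∧ fW = false then true else fW;
       if x = 'L' then (some hi, curm, lw1, fW1)
       else scanSpecT s lo (hi - 1) curm curm lw1 fW1) := by
  have h1 : 1 ≤ hi := by omega
  have htL := topIdx_succ s 'L' hi h1
  have htW := topIdx_succ s 'W' hi h1
  have hLle := topIdx_le s 'L' (hi - 1).toNat
  have hWle := topIdx_le s 'W' (hi - 1).toNat
  have hLnn := topIdx_nonneg s 'L' (hi - 1).toNat
  have hWnn := topIdx_nonneg s 'W' (hi - 1).toNat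
  have hcast : (((hi - 1).toNat : Nat) : Int) = hi - 1 := by omega
  rw [hcast] at hLle hWle
  simp only []
  rw [scanSpecT, if_neg (by omega : ¬ hi ≤ lo), htL, htW]
  by_cases hxL : s.getD hi.toNat (Char.ofNat 0) = 'L'
  · -- top cell is a log: the scan breaks immediately there
    have hxW : ¬ s.getD hi.toNat (Char.ofNat 0) = 'W' := by rw [hxL]; decide
    have hC2 : ¬ (s.getD hi.toNat (Char.ofNat 0) = 'W' ∧ fW = false) := by rintro ⟨hh, -⟩; exact hxW hh
    have eL : (if s.getD hi.toNat (Char.ofNat 0) = 'L' then hi else topIdx s 'L' (hi - 1).toNat) = hi := if_pos hxL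
    have eW : (if s.getD hi.toNat (Char.ofNat 0) = 'W' then hi else topIdx s 'W' (hi - 1).toNat)
        = topIdx s 'W' (hi - 1).toNat := if_neg hxW
    rw [eL, eW]
    rw [if_pos hxL, if_pos (by omega : hi > lo)]
    have hno : ¬ (fW = false ∧ topIdx s 'W' (hi - 1).toNat > hi) := by rintro ⟨-, hh⟩; omega
    rw [if_neg hno, if_neg hno, if_neg hC2, if_neg hC2]
  · have eL : (if s.getD hi.toNat (Char.ofNat 0) = 'L' then hi else topIdx s 'L' (hi - 1).toNat)
        = topIdx s 'L' (hi - 1).toNat := if_neg hxL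
    rw [eL]
    by_cases hxW : s.getD hi.toNat (Char.ofNat 0) = 'W'
    · -- top cell is water
      have eW : (if s.getD hi.toNat (Char.ofNat 0) = 'W' then hi else topIdx s 'W' (hi - 1).toNat)
          = hi := if_pos hxW
      rw [eW, if_neg hxL]
      cases fW with
      | true =>
        have hC2 : ¬ (s.getD hi.toNat (Char.ofNat 0) = 'W' ∧ (true : Bool) = false) := by
          rintro ⟨-, hh⟩; cases hh
        rw [if_neg hC2, if_neg hC2]
        have hT : ∀ (P : Prop), ¬ ((true : Bool) = false ∧ P) := by rintro P ⟨hh, -⟩; cases hh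
        rw [if_neg (hT _), if_neg (hT _), if_neg (hT _), if_neg (hT _)]
        by_cases hjl : topIdx s 'L' (hi - 1).toNat > lo
        · rw [if_pos hjl, scanSpecT, if_neg (by omega : ¬ hi - 1 ≤ lo), if_pos hjl]
          rw [if_neg (hT _), if_neg (hT _)]
        · rw [if_neg hjl]
          by_cases hrest : hi - 1 ≤ lo
          · rw [scanSpecT, if_pos hrest]
          · rw [scanSpecT, if_neg hrest, if_neg hjl, if_neg (hT _), if_neg (hT _)]
      | false =>
        have hC2 : (s.getD hi.toNat (Char.ofNat 0) = 'W' ∧ (false : Bool) = false) := ⟨hxW, rfl⟩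
        rw [if_pos hC2, if_pos hC2]
        have hT : ∀ (P : Prop), ¬ ((true : Bool) = false ∧ P) := by rintro P ⟨hh, -⟩; cases hh
        by_cases hjl : topIdx s 'L' (hi - 1).toNat > lo
        · rw [if_pos hjl]
          have hgt : ((false : Bool) = false ∧ hi > topIdx s 'L' (hi - 1).toNat) := ⟨rfl, by omega⟩
          rw [if_pos hgt, if_pos hgt]
          rw [scanSpecT, if_neg (by omega : ¬ hi - 1 ≤ lo), if_pos hjl]
          rw [if_neg (hT _), if_neg (hT _)]
        · rw [if_neg hjl]
          have hgt : ((false : Bool) = false ∧ hi > lo) := ⟨rfl, by omega⟩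
          rw [if_pos hgt, if_pos hgt]
          by_cases hrest : hi - 1 ≤ lo
          · rw [scanSpecT, if_pos hrest]
          · rw [scanSpecT, if_neg hrest, if_neg hjl, if_neg (hT _), if_neg (hT _)]
    · -- top cell neither log nor water: plain pass-through
      have eW : (if s.getD hi.toNat (Char.ofNat 0) = 'W' then hi else topIdx s 'W' (hi - 1).toNat)
          = topIdx s 'W' (hi - 1).toNat := if_neg hxW
      rw [eW, if_neg hxL]
      have hC2 : ¬ (s.getD hi.toNat (Char.ofNat 0) = 'W' ∧ fW = false) := by rintro ⟨hh, -⟩; exact hxW hh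
      rw [if_neg hC2, if_neg hC2]
      by_cases hjl : topIdx s 'L' (hi - 1).toNat > lo
      · rw [if_pos hjl, scanSpecT, if_neg (by omega : ¬ hi - 1 ≤ lo), if_pos hjl]
      · rw [if_neg hjl]
        by_cases hrest : hi - 1 ≤ lo
        · rw [scanSpecT, if_pos hrest]
          have hno : ¬ (fW = false ∧ topIdx s 'W' (hi - 1).toNat > lo) := by rintro ⟨-, hh⟩; omega
          rw [if_neg hno, if_neg hno]
        · rw [scanSpecT, if_neg hrest, if_neg hjl]

theorem scan_eq (s : List Char) (curm : Int) :
    ∀ (d : Nat) (lo hi lr lw : Int) (fW : Bool), (hi - lo).toNat = d → 0 ≤ lo →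
      solveScan s curm (PySem.List.pyRange hi lo (-1)) lr lw fW = scanSpecT s lo hi curm lr lw fW := by
  intro d
  induction d with
  | zero =>
    intro lo hi lr lw fW hd hlo
    rw [PySem.List.pyRange_neg_one_eq_nil (by omega), scanSpecT, if_pos (by omega)]
    rfl
  | succ d ih =>
    intro lo hi lr lw fW hd hlo
    have hlt : lo < hi := by omega
    rw [PySem.List.pyRange_neg_one_cons hlt]
    have hget : PySem.List.pyGetD s hi (Char.ofNat 0) = s.getD hi.toNat (Char.ofNat 0) :=
      PySem.List.pyGetD_of_nonneg s _ (by omega)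
    rw [scanSpecT_step s lo hi curm lr lw fW hlo hlt]
    rw [solveScan, hget]
    by_cases hxL : s.getD hi.toNat (Char.ofNat 0) = 'L'
    · rw [if_pos hxL, if_pos hxL]
    · rw [if_neg hxL, if_neg hxL]
      rw [ih lo (hi - 1) curm _ _ (by omega) hlo]

-- ==== A-side characterisation of the one-meter-at-a-time swim ====
def swimSpec2 (s : List Char) (n p k : Int) : String ⊕ (Int × Int) :=
  if (stopS s n (p + 1) ≤ n ∧ PySem.List.pyGetD s (stopS s n (p + 1)) (Char.ofNat 0) = 'C')
      ∨ k < cntSpec s (stopS s n (p + 1) - 1).toNat - cntSpec s p.toNat then Sum.inl "NO"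
  else if stopS s n (p + 1) > n then Sum.inl "YES"
  else Sum.inr (stopS s n (p + 1), k - (cntSpec s (stopS s n (p + 1) - 1).toNat - cntSpec s p.toNat))

theorem swim_eq (s : List Char) (n : Int) :
    ∀ (d : Nat) (p k : Int), (n - p).toNat = d → 0 ≤ p → p ≤ n → 0 ≤ k →
      solveSwim s n p k = swimSpec2 s n p k := by
  intro d
  induction d with
  | zero =>
    intro p k hd hp hpn hk
    have hpe : p = n := by omega
    have hT : stopS s n (p + 1) = n + 1 := by rw [stopS, dif_pos (by omega)]
    rw [solveSwim, dif_pos (by omega), swimSpec2, hT]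
    have hc : cntSpec s (n + 1 - 1).toNat - cntSpec s p.toNat = 0 := by
      rw [show n + 1 - 1 = p by omega]; omega
    rw [if_neg (by rw [hc]; rintro (⟨hh, -⟩ | hh) <;> omega), if_pos (by omega)]
  | succ d ih =>
    intro p k hd hp hpn hk
    by_cases hfar : p + 1 > n
    · have hT : stopS s n (p + 1) = n + 1 := by rw [stopS, dif_pos (by omega)]
      rw [solveSwim, dif_pos (by omega), swimSpec2, hT]
      have hc : cntSpec s (n + 1 - 1).toNat - cntSpec s p.toNat = 0 := by
        rw [show n + 1 - 1 = p by omega]; omega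
      rw [if_neg (by rw [hc]; rintro (⟨hh, -⟩ | hh) <;> omega), if_pos (by omega)]
    · have hle : p + 1 ≤ n := by omega
      have hx : PySem.List.pyGetD s (p + 1) (Char.ofNat 0) = s.getD (p + 1).toNat (Char.ofNat 0) :=
        PySem.List.pyGetD_of_nonneg s _ (by omega)
      have hsucc : (p + 1).toNat = p.toNat + 1 := by omega
      have hcnt1 : cntSpec s (p + 1).toNat
          = cntSpec s p.toNat + (if s.getD (p + 1).toNat (Char.ofNat 0) = 'W' then 1 else 0) := by
        rw [hsucc, cntSpec, ← hsucc]
      rw [solveSwim, dif_neg (by omega : ¬ p + 1 > n)]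
      by_cases hxL : PySem.List.pyGetD s (p + 1) (Char.ofNat 0) = 'L'
      · have hT : stopS s n (p + 1) = p + 1 := by
          rw [stopS, dif_neg (by omega), if_pos (Or.inl hxL)]
        rw [if_pos hxL, swimSpec2, hT]
        have hc : cntSpec s (p + 1 - 1).toNat - cntSpec s p.toNat = 0 := by
          rw [show p + 1 - 1 = p by omega]; omega
        have hxC : ¬ PySem.List.pyGetD s (p + 1) (Char.ofNat 0) = 'C' := by rw [hxL]; decide
        rw [if_neg (by rw [hc]; rintro (⟨-, hh⟩ | hh); exact hxC hh; omega), if_neg (by omega)]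
        rw [hc, show k - 0 = k by ring]
      · rw [if_neg hxL]
        by_cases hxC : PySem.List.pyGetD s (p + 1) (Char.ofNat 0) = 'C'
        · have hT : stopS s n (p + 1) = p + 1 := by
            rw [stopS, dif_neg (by omega), if_pos (Or.inr hxC)]
          have hxW : ¬ PySem.List.pyGetD s (p + 1) (Char.ofNat 0) = 'W' := by rw [hxC]; decide
          rw [if_neg hxW, if_pos hxC, swimSpec2, hT]
          rw [if_pos (Or.inl ⟨by omega, hxC⟩)]
        · have hT : stopS s n (p + 1) = stopS s n (p + 2) := by
            rw [stopS, dif_neg (by omega), if_neg (by rintro (hh | hh); exact hxL hh; exact hxC hh)]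
            rw [show p + 1 + 1 = p + 2 by ring]
          have hge : p + 2 ≤ stopS s n (p + 2) := stopS_ge s n (n + 1 - (p + 2)).toNat (p + 2) rfl (by omega)
          have hcm := cntSpec_mono s (p + 1).toNat (stopS s n (p + 2) - 1).toNat (by omega)
          by_cases hxW : PySem.List.pyGetD s (p + 1) (Char.ofNat 0) = 'W'
          · have hcnt : cntSpec s (p + 1).toNat = cntSpec s p.toNat + 1 := by
              rw [hcnt1, if_pos (by rw [← hx]; exact hxW)]
            rw [if_pos hxW]
            by_cases hk0 : k = 0
            · rw [if_pos hk0, swimSpec2, hT, if_pos (Or.inr (by omega))]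
            · rw [if_neg hk0]
              rw [ih (p + 1) (k - 1) (by omega) (by omega) (by omega) (by omega)]
              rw [swimSpec2, swimSpec2, show p + 1 + 1 = p + 2 by ring, hT]
              by_cases hC : stopS s n (p + 2) ≤ n ∧ PySem.List.pyGetD s (stopS s n (p + 2)) (Char.ofNat 0) = 'C'
              · rw [if_pos (Or.inl hC), if_pos (Or.inl hC)]
              · by_cases hlt : k < cntSpec s (stopS s n (p + 2) - 1).toNat - cntSpec s p.toNat
                · have hlt' : k - 1 < cntSpec s (stopS s n (p + 2) - 1).toNat - cntSpec s (p + 1).toNat := by omega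
                  rw [if_pos (Or.inr hlt'), if_pos (Or.inr hlt)]
                · have hnegL : ¬ ((stopS s n (p + 2) ≤ n ∧ PySem.List.pyGetD s (stopS s n (p + 2)) (Char.ofNat 0) = 'C')
                      ∨ k - 1 < cntSpec s (stopS s n (p + 2) - 1).toNat - cntSpec s (p + 1).toNat) := by
                    rintro (hh | hh); exact hC hh; omega
                  have hnegR : ¬ ((stopS s n (p + 2) ≤ n ∧ PySem.List.pyGetD s (stopS s n (p + 2)) (Char.ofNat 0) = 'C')
                      ∨ k < cntSpec s (stopS s n (p + 2) - 1).toNat - cntSpec s p.toNat) := by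
                    rintro (hh | hh); exact hC hh; omega
                  rw [if_neg hnegL, if_neg hnegR]
                  by_cases hTn : stopS s n (p + 2) > n
                  · rw [if_pos hTn, if_pos hTn]
                  · rw [if_neg hTn, if_neg hTn]
                    rw [show k - 1 - (cntSpec s (stopS s n (p + 2) - 1).toNat - cntSpec s (p + 1).toNat)
                          = k - (cntSpec s (stopS s n (p + 2) - 1).toNat - cntSpec s p.toNat) by omega]
          · have hcnt : cntSpec s (p + 1).toNat = cntSpec s p.toNat := by
              rw [hcnt1, if_neg (by rw [← hx]; exact hxW)]; ring
            rw [if_neg hxW, if_neg hxC]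
            rw [ih (p + 1) k (by omega) (by omega) (by omega) hk]
            rw [swimSpec2, swimSpec2, show p + 1 + 1 = p + 2 by ring, hT, hcnt]

-- ==== correctness of the three precomputed tables ====
theorem getD_replicate (nn i : Nat) (v d : Int) :
    (List.replicate nn v).getD i d = if i < nn then v else d := by
  rw [List.getD_eq_getElem?_getD, List.getElem?_replicate]
  split <;> simp

theorem prev_tables (s : List Char) (n : Int) :
    ∀ (d : Nat) (j : Int) (tL tW : List Int) (pl pw : Int),
      (n + 1 - j).toNat = d → 1 ≤ j →
      tL.length = (n + 1).toNat → tW.length = (n + 1).toNat →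
      pl = topIdx s 'L' (j - 1).toNat → pw = topIdx s 'W' (j - 1).toNat →
      (∀ i : Int, 1 ≤ i → i < j →
        tL.getD i.toNat 0 = topIdx s 'L' i.toNat ∧ tW.getD i.toNat 0 = topIdx s 'W' i.toNat) →
      ∀ i : Int, 1 ≤ i → i ≤ n →
        (((PySem.List.pyRange j (n + 1) 1).foldl (bPrevStep s) (tL, tW, pl, pw)).1.getD i.toNat 0
            = topIdx s 'L' i.toNat ∧
         ((PySem.List.pyRange j (n + 1) 1).foldl (bPrevStep s) (tL, tW, pl, pw)).2.1.getD i.toNat 0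
            = topIdx s 'W' i.toNat) := by
  intro d
  induction d with
  | zero =>
    intro j tL tW pl pw hd hj hlL hlW hpl hpw hinv i hi1 hin
    rw [PySem.List.pyRange_one_eq_nil (by omega)]
    exact hinv i hi1 (by omega)
  | succ d ih =>
    intro j tL tW pl pw hd hj hlL hlW hpl hpw hinv i hi1 hin
    have hjn : j ≤ n := by omega
    rw [PySem.List.pyRange_one_cons (by omega), List.foldl_cons]
    have hgc : PySem.List.pyGetD s j (Char.ofNat 0) = s.getD j.toNat (Char.ofNat 0) :=
      PySem.List.pyGetD_of_nonneg s _ (by omega)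
    have hstep : bPrevStep s (tL, tW, pl, pw) j =
        (PySem.List.pySetD tL j (topIdx s 'L' j.toNat), PySem.List.pySetD tW j (topIdx s 'W' j.toNat),
         topIdx s 'L' j.toNat, topIdx s 'W' j.toNat) := by
      rw [bPrevStep]
      rw [topIdx_succ s 'L' j (by omega), topIdx_succ s 'W' j (by omega), ← hpl, ← hpw, ← hgc]
    rw [hstep]
    apply ih (j + 1) _ _ _ _ (by omega) (by omega)
      (by rw [PySem.List.length_pySetD]; exact hlL)
      (by rw [PySem.List.length_pySetD]; exact hlW)
      (by rw [show j + 1 - 1 = j by ring]) (by rw [show j + 1 - 1 = j by ring]) _ i hi1 hin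
    intro i' h1 h2
    rw [PySem.List.pySetD_of_nonneg tL _ (by omega), PySem.List.pySetD_of_nonneg tW _ (by omega),
        getD_set_eq, getD_set_eq]
    by_cases hij : i' = j
    · have he : j.toNat = i'.toNat := by omega
      rw [if_pos ⟨he, by omega⟩, if_pos ⟨he, by omega⟩, ← he]
      exact ⟨rfl, rfl⟩
    · have hne : ¬ (j.toNat = i'.toNat ∧ j.toNat < tL.length) := by rintro ⟨hh, -⟩; omega
      have hne2 : ¬ (j.toNat = i'.toNat ∧ j.toNat < tW.length) := by rintro ⟨hh, -⟩; omega
      rw [if_neg hne, if_neg hne2]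
      exact hinv i' h1 (by omega)

theorem stop_table (s : List Char) (n : Int) (hn0 : 0 ≤ n) :
    ∀ (d : Nat) (t : Int) (tbl : List Int), t.toNat = d → 0 ≤ t → t ≤ n →
      tbl.length = (n + 2).toNat →
      (∀ u : Int, t + 1 ≤ u → u ≤ n + 1 → tbl.getD u.toNat 0 = stopS s n u) →
      ∀ u : Int, 1 ≤ u → u ≤ n + 1 →
        ((PySem.List.pyRange t 0 (-1)).foldl (bStopStep s) tbl).getD u.toNat 0 = stopS s n u := by
  intro d
  induction d with
  | zero =>
    intro t tbl hd ht0 htn hlen hinv u h1 h2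
    rw [PySem.List.pyRange_neg_one_eq_nil (by omega)]
    exact hinv u (by omega) h2
  | succ d ih =>
    intro t tbl hd ht0 htn hlen hinv u h1 h2
    have ht1 : 1 ≤ t := by omega
    rw [PySem.List.pyRange_neg_one_cons (by omega), List.foldl_cons]
    have hval : bStopStep s tbl t = PySem.List.pySetD tbl t (stopS s n t) := by
      rw [bStopStep]
      have : PySem.List.pyGetD tbl (t + 1) 0 = tbl.getD (t + 1).toNat 0 :=
        PySem.List.pyGetD_of_nonneg tbl _ (by omega)
      rw [this, hinv (t + 1) (by omega) (by omega)]
      congr 1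
      conv_rhs => rw [stopS]
      rw [dif_neg (by omega : ¬ n < t)]
    rw [hval]
    apply ih (t - 1) _ (by omega) (by omega) (by omega)
      (by rw [PySem.List.length_pySetD]; exact hlen) _ u h1 h2
    intro u' hu1 hu2
    rw [PySem.List.pySetD_of_nonneg tbl _ (by omega), getD_set_eq]
    by_cases huv : u' = t
    · rw [if_pos ⟨by omega, by omega⟩, huv]
    · rw [if_neg (by rintro ⟨hh, -⟩; omega)]
      exact hinv u' (by omega) hu2

theorem cnt_table (s : List Char) (n : Int) :
    ∀ (d : Nat) (j : Int) (tbl : List Int), (n + 1 - j).toNat = d → 1 ≤ j →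
      tbl.length = (n + 2).toNat →
      (∀ u : Int, 1 ≤ u → u ≤ j → tbl.getD u.toNat 0 = cntSpec s (u - 1).toNat) →
      ∀ u : Int, 1 ≤ u → u ≤ n + 1 →
        ((PySem.List.pyRange j (n + 1) 1).foldl (bCntStep s) tbl).getD u.toNat 0
          = cntSpec s (u - 1).toNat := by
  intro d
  induction d with
  | zero =>
    intro j tbl hd hj hlen hinv u h1 h2
    rw [PySem.List.pyRange_one_eq_nil (by omega)]
    exact hinv u h1 (by omega)
  | succ d ih =>
    intro j tbl hd hj hlen hinv u h1 h2
    have hjn : j ≤ n := by omega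
    rw [PySem.List.pyRange_one_cons (by omega), List.foldl_cons]
    have hgc : PySem.List.pyGetD s j (Char.ofNat 0) = s.getD j.toNat (Char.ofNat 0) :=
      PySem.List.pyGetD_of_nonneg s _ (by omega)
    have hval : bCntStep s tbl j = PySem.List.pySetD tbl (j + 1) (cntSpec s j.toNat) := by
      rw [bCntStep]
      have hg : PySem.List.pyGetD tbl j 0 = tbl.getD j.toNat 0 :=
        PySem.List.pyGetD_of_nonneg tbl _ (by omega)
      rw [hg, hinv j (by omega) le_rfl, hgc]
      congr 1
      rw [show j.toNat = (j - 1).toNat + 1 by omega, cntSpec,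
          show (j - 1).toNat + 1 = j.toNat by omega]
    rw [hval]
    apply ih (j + 1) _ (by omega) (by omega)
      (by rw [PySem.List.length_pySetD]; exact hlen) _ u h1 h2
    intro u' hu1 hu2
    rw [PySem.List.pySetD_of_nonneg tbl _ (by omega), getD_set_eq]
    by_cases huv : u' = j + 1
    · rw [if_pos ⟨by omega, by omega⟩, huv, show j + 1 - 1 = j by ring]
    · rw [if_neg (by rintro ⟨hh, -⟩; omega)]
      exact hinv u' hu1 (by omega)

-- ==== the shared tail of one loop iteration, equal on both sides ====
theorem tail_eq (s : List Char) (n m : Int) (prevL prevW stopT cntT : List Int) (fuel : Nat)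
    (hST : ∀ u : Int, 1 ≤ u → u ≤ n + 1 → PySem.List.pyGetD stopT u 0 = stopS s n u)
    (hCT : ∀ u : Int, 1 ≤ u → u ≤ n + 1 → PySem.List.pyGetD cntT u 0 = cntSpec s (u - 1).toNat)
    (lrx lwx k : Int) (hlr0 : 0 ≤ lrx) (hlrn : lrx ≤ n) (hlw0 : 0 ≤ lwx) (hlwn : lwx ≤ n) (hk : 0 ≤ k)
    (ih : ∀ cur lr lw k2 : Int, 0 ≤ cur → 0 ≤ lr → lr ≤ n → 0 ≤ lw → lw ≤ n → 0 ≤ k2 →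
      solveLoop s n m fuel cur lr lw k2 = bLoop s n m prevL prevW stopT cntT fuel cur lr lw k2) :
    (if lrx ≠ lwx ∨ k = 0 then "NO"
     else match solveSwim s n lwx (k - 1) with
       | Sum.inl r => r
       | Sum.inr (cur', k') => solveLoop s n m fuel cur' lrx lwx k')
    = bTail s n stopT cntT (bLoop s n m prevL prevW stopT cntT fuel) lrx lwx k := by
  rw [bTail]
  by_cases hc : lrx ≠ lwx ∨ k = 0
  · rw [if_pos hc, if_pos (by rcases hc with h | h; exact Or.inl (Ne.symm h); exact Or.inr h)]
  · have heq : lrx = lwx := by rcases not_or.mp hc with ⟨h, -⟩; exact not_not.mp (fun hh => h hh)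
    have hkne : ¬ k = 0 := by rcases not_or.mp hc with ⟨-, h⟩; exact h
    rw [if_neg hc, if_neg (by rintro (hh | hh); exact hh heq.symm; exact hkne hh)]
    simp only []
    have hTge : lwx + 1 ≤ stopS s n (lwx + 1) :=
      stopS_ge s n (n + 1 - (lwx + 1)).toNat (lwx + 1) rfl (by omega)
    have hTle : stopS s n (lwx + 1) ≤ n + 1 :=
      stopS_le s n (n + 1 - (lwx + 1)).toNat (lwx + 1) rfl (by omega)
    rw [hST (lwx + 1) (by omega) (by omega)]
    rw [hCT (stopS s n (lwx + 1)) (by omega) (by omega), hCT (lwx + 1) (by omega) (by omega)]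
    rw [show lwx + 1 - 1 = lwx by ring]
    rw [swim_eq s n (n - lwx).toNat lwx (k - 1) rfl hlw0 hlwn (by omega), swimSpec2]
    have hcm : cntSpec s lwx.toNat ≤ cntSpec s (stopS s n (lwx + 1) - 1).toNat :=
      cntSpec_mono s _ _ (by omega)
    by_cases hC : stopS s n (lwx + 1) ≤ n ∧
        PySem.List.pyGetD s (stopS s n (lwx + 1)) (Char.ofNat 0) = 'C'
    · rw [if_pos (Or.inl hC), if_pos (Or.inl hC)]
    · by_cases hle : k ≤ cntSpec s (stopS s n (lwx + 1) - 1).toNat - cntSpec s lwx.toNat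
      · rw [if_pos (Or.inr (by omega)), if_pos (Or.inr hle)]
      · have hnegL : ¬ ((stopS s n (lwx + 1) ≤ n ∧
            PySem.List.pyGetD s (stopS s n (lwx + 1)) (Char.ofNat 0) = 'C') ∨
            k - 1 < cntSpec s (stopS s n (lwx + 1) - 1).toNat - cntSpec s lwx.toNat) := by
          rintro (hh | hh); exact hC hh; omega
        have hnegR : ¬ ((stopS s n (lwx + 1) ≤ n ∧
            PySem.List.pyGetD s (stopS s n (lwx + 1)) (Char.ofNat 0) = 'C') ∨
            k ≤ cntSpec s (stopS s n (lwx + 1) - 1).toNat - cntSpec s lwx.toNat) := by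
          rintro (hh | hh); exact hC hh; omega
        rw [if_neg hnegL, if_neg hnegR]
        by_cases hTn : stopS s n (lwx + 1) > n
        · rw [if_pos hTn, if_pos hTn]
        · rw [if_neg hTn, if_neg hTn]
          simp only []
          rw [show k - 1 - (cntSpec s (stopS s n (lwx + 1) - 1).toNat - cntSpec s lwx.toNat)
                = k - (cntSpec s (stopS s n (lwx + 1) - 1).toNat - cntSpec s lwx.toNat + 1) by ring]
          exact ih _ _ _ _ (by omega) hlr0 hlrn hlw0 hlwn (by omega)

theorem loop_eq (s : List Char) (n m : Int) (prevL prevW stopT cntT : List Int)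
    (hm : 0 ≤ m)
    (hL : ∀ i : Int, 1 ≤ i → i ≤ n → PySem.List.pyGetD prevL i 0 = topIdx s 'L' i.toNat)
    (hW : ∀ i : Int, 1 ≤ i → i ≤ n → PySem.List.pyGetD prevW i 0 = topIdx s 'W' i.toNat)
    (hST : ∀ u : Int, 1 ≤ u → u ≤ n + 1 → PySem.List.pyGetD stopT u 0 = stopS s n u)
    (hCT : ∀ u : Int, 1 ≤ u → u ≤ n + 1 → PySem.List.pyGetD cntT u 0 = cntSpec s (u - 1).toNat) :
    ∀ (fuel : Nat) (cur lr lw k : Int), 0 ≤ cur → 0 ≤ lr → lr ≤ n → 0 ≤ lw → lw ≤ n → 0 ≤ k →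
      solveLoop s n m fuel cur lr lw k = bLoop s n m prevL prevW stopT cntT fuel cur lr lw k := by
  intro fuel
  induction fuel with
  | zero => intros; rfl
  | succ fuel ih =>
    intro cur lr lw k hc0 hlr0 hlrn hlw0 hlwn hk0
    by_cases hgo : cur + m > n
    · rw [solveLoop, bLoop, if_pos hgo, if_neg (by omega)]
    · rw [solveLoop, bLoop, if_neg hgo, if_pos (by omega)]
      simp only []
      rw [show m + cur = cur + m by ring]
      rw [scan_eq s (cur + m) ((cur + m) - lr).toNat lr (cur + m) lr lw false rfl hlr0]
      by_cases hempty : cur + m ≤ lr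
      · rw [scanSpecT, if_pos hempty, if_neg (by omega : ¬ cur + m > lr)]
        exact tail_eq s n m prevL prevW stopT cntT fuel hST hCT lr lw k hlr0 hlrn hlw0 hlwn hk0
          (fun a b c2 d2 ha hb hb2 hc hc2 hd => ih a b c2 d2 ha hb hb2 hc hc2 hd)
      · rw [scanSpecT, if_neg hempty, if_pos (by omega : cur + m > lr)]
        have hLv := hL (cur + m) (by omega) (by omega)
        have hWv := hW (cur + m) (by omega) (by omega)
        have hjle := topIdx_le s 'L' (cur + m).toNat
        have hwle := topIdx_le s 'W' (cur + m).toNat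
        have hjnn := topIdx_nonneg s 'L' (cur + m).toNat
        have hwnn := topIdx_nonneg s 'W' (cur + m).toNat
        have hcast : (((cur + m).toNat : Nat) : Int) = cur + m := by omega
        rw [hcast] at hjle hwle
        rw [hLv, hWv]
        by_cases hjl : topIdx s 'L' (cur + m).toNat > lr
        · rw [if_pos hjl, if_pos hjl]
          simp only []
          by_cases hwj : topIdx s 'W' (cur + m).toNat > topIdx s 'L' (cur + m).toNat
          · rw [if_pos (⟨trivial, hwj⟩ : True ∧ _), if_pos hwj]
            exact ih _ _ _ _ (by omega) (by omega) (by omega) (by omega) (by omega) hk0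
          · have hnc : ¬ (True ∧ topIdx s 'W' (cur + m).toNat > topIdx s 'L' (cur + m).toNat) := by
              rintro ⟨-, hh⟩; exact hwj hh
            rw [if_neg hnc, if_neg hwj]
            exact ih _ _ _ _ (by omega) (by omega) (by omega) hlw0 hlwn hk0
        · rw [if_neg hjl, if_neg hjl]
          simp only []
          by_cases hwlr : topIdx s 'W' (cur + m).toNat > lr
          · rw [if_pos (⟨trivial, hwlr⟩ : True ∧ _), if_pos hwlr]
            exact tail_eq s n m prevL prevW stopT cntT fuel hST hCT (cur + m) _ k
              (by omega) (by omega) (by omega) (by omega) hk0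
              (fun a b c2 d2 ha hb hb2 hc hc2 hd => ih a b c2 d2 ha hb hb2 hc hc2 hd)
          · have hnc : ¬ (True ∧ topIdx s 'W' (cur + m).toNat > lr) := by
              rintro ⟨-, hh⟩; exact hwlr hh
            rw [if_neg hnc, if_neg hwlr]
            exact tail_eq s n m prevL prevW stopT cntT fuel hST hCT (cur + m) lw k
              (by omega) (by omega) hlw0 hlwn hk0
              (fun a b c2 d2 ha hb hb2 hc hc2 hd => ih a b c2 d2 ha hb hb2 hc hc2 hd)

-- ===== VERDICT (by name: the statement is the Claim_ definition above) =====
theorem solve_spec : Claim_equal_solve := by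
  intro n m k a _ hpre
  unfold Spec_solve solve solve_alt
  by_cases hmn : m > n
  · rw [if_pos hmn,
        show 2 * a.toList.length + 10 = (2 * a.toList.length + 9) + 1 by omega,
        solveLoop, if_pos (by omega)]
  · rw [if_neg hmn]
    simp only []
    have hm : 0 ≤ m := by
      rcases hpre with ⟨h, -, -⟩ | h
      · exact h
      · omega
    have hn : n ≤ (a.toList.length : Int) := by
      rcases hpre with ⟨-, -, h⟩ | h
      · exact h
      · omega
    have hn0 : 0 ≤ n := by omega
    have hlen : ('0' :: a.toList).length = a.toList.length + 1 := by simp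
    have hprev := prev_tables ('0' :: a.toList) n n.toNat 1
      (List.replicate (n + 1).toNat 0) (List.replicate (n + 1).toNat 0) 0 0
      (by omega) le_rfl (by simp) (by simp)
      (by simp [topIdx]) (by simp [topIdx]) (by intro i h1 h2; omega)
    have hstop := stop_table ('0' :: a.toList) n hn0 n.toNat n
      (PySem.List.pySetD (List.replicate (n + 2).toNat 0) (n + 1) (n + 1))
      rfl hn0 le_rfl (by rw [PySem.List.length_pySetD]; simp)
      (by
        intro u h1 h2
        have hu : u = n + 1 := by omega
        rw [hu, PySem.List.pySetD_of_nonneg _ _ (by omega), getD_set_eq,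
            if_pos ⟨rfl, by simp; omega⟩, stopS, dif_pos (by omega)])
    have hcnt := cnt_table ('0' :: a.toList) n n.toNat 1 (List.replicate (n + 2).toNat 0)
      (by omega) le_rfl (by simp)
      (by
        intro u h1 h2
        have hu : u = 1 := by omega
        rw [hu, getD_replicate, if_pos (by omega), show (1 : Int) - 1 = 0 by ring]
        rfl)
    apply loop_eq ('0' :: a.toList) n m _ _ _ _ hm
      (fun i h1 h2 => by
        rw [PySem.List.pyGetD_of_nonneg _ _ (by omega)]
        exact (hprev i h1 h2).1)
      (fun i h1 h2 => by
        rw [PySem.List.pyGetD_of_nonneg _ _ (by omega)]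
        exact (hprev i h1 h2).2)
      (fun u h1 h2 => by
        rw [PySem.List.pyGetD_of_nonneg _ _ (by omega)]
        exact hstop u h1 h2)
      (fun u h1 h2 => by
        rw [PySem.List.pyGetD_of_nonneg _ _ (by omega)]
        exact hcnt u h1 h2)
      (2 * a.toList.length + 10) 0 0 0 k le_rfl le_rfl hn0 le_rfl hn0
      (by rcases hpre with ⟨-, h, -⟩ | h <;> omega)
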